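-- pv_equiv track=rewrite | github.com/VishwajeetEkal/CSCI-B505-Applied-Algorithms | Assignment 6/Solution.py | maximumPeople
-- ===== SOURCE A (Python) =====
-- def maximumPeople(personHeight, roomHeight):
--     personHeight.sort()
--
--     maxPeople = 0
--     itrPeople, itrRoom = 0, 0
--     run =len(roomHeight)
--     while itrPeople < len(personHeight) and itrRoom < run:
--
--         if personHeight[itrPeople] <= roomHeight[itrRoom]:
--
--             itrRoom+=1
--         elif itrRoom -1 >=0 :
--
--             maxPeople +=1
--             run = itrRoom-1
--             itrPeople+=1
--             itrRoom=0
--             continue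
--         else:
--
--             return maxPeople
--
--         if itrRoom == run and itrPeople < len(personHeight):
--
--             maxPeople +=1
--             run = itrRoom-1
--             itrPeople+=1
--             itrRoom=0
--
--     return maxPeople
-- ===== SOURCE B (Python) =====
-- def maximumPeople(personHeight, roomHeight):
--     personHeight.sort()
--     m = len(roomHeight)
--     # prefix minima of roomHeight: pm[k] = min(roomHeight[0..k])
--     pm = []
--     cur = None
--     for x in roomHeight:
--         cur = x if cur is None else min(cur, x)
--         pm.append(cur)
--     count = 0
--     run = m
--     ptr = m  # first index with pm[index] < current person height (monotone pointer)
--     for h in personHeight: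
--         if run <= 0:
--             return count
--         while ptr > 0 and pm[ptr - 1] < h:
--             ptr -= 1
--         j = ptr if ptr < run else run
--         if j == 0:
--             return count
--         count += 1
--         run = j - 1
--     return count
-- ===== Notes on version B (the rewrite author's own statement) =====
-- stated objective: faster
-- what changed: Replaces A's repeated left-to-right rescans of the shrinking room range by a prefix-minimum array of room heights plus a single monotone pointer swept once over the sorted persons.
import Mathlib
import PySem

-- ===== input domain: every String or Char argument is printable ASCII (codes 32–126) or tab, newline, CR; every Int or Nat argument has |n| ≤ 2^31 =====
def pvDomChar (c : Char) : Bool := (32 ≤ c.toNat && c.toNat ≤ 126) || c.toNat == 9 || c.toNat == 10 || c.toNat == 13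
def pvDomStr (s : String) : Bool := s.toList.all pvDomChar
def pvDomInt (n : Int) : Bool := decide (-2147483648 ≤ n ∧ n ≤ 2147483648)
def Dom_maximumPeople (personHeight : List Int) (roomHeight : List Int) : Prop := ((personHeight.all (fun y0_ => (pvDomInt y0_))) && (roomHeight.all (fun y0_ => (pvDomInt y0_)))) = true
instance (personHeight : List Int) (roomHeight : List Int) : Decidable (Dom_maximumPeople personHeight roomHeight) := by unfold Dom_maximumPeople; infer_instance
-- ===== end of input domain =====

-- B replaces A's repeated left-to-right rescans of the shrinking room range by a prefix-minimum
-- array plus one monotone pointer over the sorted persons (objective: faster).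
-- Both Pythons sort personHeight in place; the equivalence proved here is about the return value.

-- ===== PORT A =====
-- A's while loop: state (maxPeople, itrPeople, itrRoom, run); indices are in range whenever read,
-- so getD is exact. Branches in Python order; the trailing `if itrRoom == run ...` check follows
-- the first branch (the elif `continue`s past it, the else returns).
def maximumPeopleLoopA (p r : List Int) (maxPeople : Int) (itrPeople itrRoom run : Nat) : Int :=
  if _h : itrPeople < p.length ∧ itrRoom < run then
    if p.getD itrPeople 0 ≤ r.getD itrRoom 0 then
      -- itrRoom += 1, then the trailing `if itrRoom == run and itrPeople < len(personHeight)`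
      if itrRoom + 1 = run ∧ itrPeople < p.length then
        maximumPeopleLoopA p r (maxPeople + 1) (itrPeople + 1) 0 (run - 1)
      else
        maximumPeopleLoopA p r maxPeople itrPeople (itrRoom + 1) run
    else if 1 ≤ itrRoom then  -- itrRoom - 1 >= 0
      maximumPeopleLoopA p r (maxPeople + 1) (itrPeople + 1) 0 (itrRoom - 1)
    else
      maxPeople
  else maxPeople
termination_by (p.length - itrPeople, run - itrRoom)
decreasing_by all_goals (simp_wf; omega)

def maximumPeople (personHeight : List Int) (roomHeight : List Int) : Int :=
  maximumPeopleLoopA (PySem.List.sorted personHeight (fun x => x) false) roomHeight 0 0 0 roomHeight.length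

-- ===== PORT B =====
-- prefix minima of the room list (Source B's first loop; `cur` starts as None)
def pmAux (cur : Option Int) : List Int → List Int
  | [] => []
  | x :: t =>
    let c := match cur with | none => x | some c0 => min c0 x
    c :: pmAux (some c) t

-- Source B's inner while: move ptr left while pm[ptr-1] < h
def movePtr (pm : List Int) (h : Int) (ptr : Nat) : Nat :=
  if ptr > 0 then
    if pm.getD (ptr - 1) 0 < h then movePtr pm h (ptr - 1) else ptr
  else ptr

-- Source B's main for-loop over the sorted persons; state (count, run, ptr)
def maximumPeopleLoopB (pm : List Int) (count : Int) (run ptr : Nat) : List Int → Int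
  | [] => count
  | h :: rest =>
    if run = 0 then count
    else
      let p := movePtr pm h ptr
      let j := if p < run then p else run
      if j = 0 then count
      else maximumPeopleLoopB pm (count + 1) (j - 1) p rest

def maximumPeople_alt (personHeight : List Int) (roomHeight : List Int) : Int :=
  maximumPeopleLoopB (pmAux none roomHeight) 0 roomHeight.length roomHeight.length
    (PySem.List.sorted personHeight (fun x => x) false)

-- ===== PRECONDITION & SPEC =====
def Spec_maximumPeople (personHeight : List Int) (roomHeight : List Int) (out : Int) : Prop := out = maximumPeople_alt personHeight roomHeight
instance (personHeight : List Int) (roomHeight : List Int) (out : Int) : Decidable (Spec_maximumPeople personHeight roomHeight out) := by unfold Spec_maximumPeople; infer_instance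

-- ===== CLAIM (what is proved, stated in full; the proofs are below) =====
def Claim_equal_maximumPeople : Prop := ∀ (personHeight : List Int) (roomHeight : List Int), Dom_maximumPeople personHeight roomHeight → Spec_maximumPeople personHeight roomHeight (maximumPeople personHeight roomHeight)

-- ===== LEMMAS AND PROOFS =====

-- fIdx h r: first index j with r[j] < h (r.length if none); the common yardstick of both proofs
def fIdx (h : Int) : List Int → Nat
  | [] => 0
  | x :: t => if x < h then 0 else fIdx h t + 1

-- common specification: one step per sorted person, range bound `run` shrinking to min(fIdx,run)-1
def FSpec (r : List Int) : Nat → List Int → Int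
  | _, [] => 0
  | run, h :: t =>
    if run = 0 then 0
    else
      let j := min (fIdx h r) run
      if j = 0 then 0 else 1 + FSpec r (j - 1) t

theorem fIdx_le_length (h : Int) (r : List Int) : fIdx h r ≤ r.length := by
  induction r with
  | nil => simp [fIdx]
  | cons x t ih => simp only [fIdx, List.length_cons]; split <;> omega

theorem fIdx_le_of_getD_lt (h : Int) (r : List Int) (k : Nat) (hlen : k < r.length)
    (hlt : r.getD k 0 < h) : fIdx h r ≤ k := by
  induction r generalizing k with
  | nil => simp at hlen
  | cons x t ih =>
    simp only [fIdx]
    split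
    · omega
    · cases k with
      | zero => simp at hlt; exact absurd hlt ‹¬ x < h›
      | succ k =>
        have := ih k (by simpa using hlen) (by simpa using hlt)
        omega

theorem getD_fIdx_lt (h : Int) (r : List Int) (hlen : fIdx h r < r.length) :
    r.getD (fIdx h r) 0 < h := by
  induction r with
  | nil => simp at hlen
  | cons x t ih =>
    by_cases hx : x < h
    · simp [fIdx, hx]
    · simp only [fIdx, if_neg hx, List.length_cons] at hlen ⊢
      simp only [List.getD_cons_succ]
      exact ih (by omega)

theorem fIdx_antitone (a b : Int) (r : List Int) (hab : a ≤ b) : fIdx b r ≤ fIdx a r := by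
  induction r with
  | nil => simp [fIdx]
  | cons x t ih =>
    simp only [fIdx]
    split <;> split <;> omega

-- characterisation of the prefix-min list: pm[k] < h ↔ first index with r[·] < h is ≤ k
theorem pmAux_getD_lt_iff (h : Int) (c : Int) (r : List Int) (k : Nat) (hk : k < r.length) :
    ((pmAux (some c) r).getD k 0 < h ↔ (c < h ∨ fIdx h r ≤ k)) := by
  induction r generalizing c k with
  | nil => simp at hk
  | cons x t ih =>
    simp only [pmAux]
    cases k with
    | zero =>
      simp only [List.getD_cons_zero, fIdx]
      constructor
      · intro hm
        rcases min_lt_iff.mp hm with h1 | h1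
        · left; exact h1
        · right; simp [h1]
      · intro hm
        rcases hm with hm | hm
        · exact min_lt_iff.mpr (Or.inl hm)
        · split at hm
          · exact min_lt_iff.mpr (Or.inr ‹x < h›)
          · omega
    | succ k =>
      simp only [List.getD_cons_succ, fIdx]
      rw [ih (min c x) k (by simpa using hk)]
      constructor
      · rintro (hm | hm)
        · rcases min_lt_iff.mp hm with h1 | h1
          · left; exact h1
          · right; split
            · omega
            · exact absurd h1 ‹¬ x < h›
        · right; split
          · omega
          · omega
      · rintro (hm | hm)
        · left; exact min_lt_iff.mpr (Or.inl hm)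
        · split at hm
          · left; exact min_lt_iff.mpr (Or.inr ‹x < h›)
          · right; omega

theorem pm_getD_lt_iff (h : Int) (r : List Int) (k : Nat) (hk : k < r.length) :
    ((pmAux none r).getD k 0 < h ↔ fIdx h r ≤ k) := by
  cases r with
  | nil => simp at hk
  | cons x t =>
    simp only [pmAux]
    cases k with
    | zero =>
      simp only [List.getD_cons_zero, fIdx]
      constructor
      · intro hm; simp [hm]
      · intro hm; split at hm
        · assumption
        · omega
    | succ k =>
      simp only [List.getD_cons_succ, fIdx]
      rw [pmAux_getD_lt_iff h x t k (by simpa using hk)]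
      constructor
      · rintro (hm | hm)
        · split
          · omega
          · exact absurd hm ‹¬ x < h›
        · split
          · omega
          · omega
      · intro hm; split at hm
        · left; assumption
        · right; omega

-- movePtr computes min ptr (fIdx h pm) on a prefix-min list
theorem movePtr_eq (h : Int) (r : List Int) (ptr : Nat) (hp : ptr ≤ r.length) :
    movePtr (pmAux none r) h ptr = min ptr (fIdx h r) := by
  induction ptr with
  | zero => simp [movePtr]
  | succ n ih =>
    rw [movePtr]
    simp only [Nat.succ_sub_one, gt_iff_lt, Nat.succ_pos, if_true]
    by_cases hlt : (pmAux none r).getD n 0 < h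
    · have hfi : fIdx h r ≤ n := (pm_getD_lt_iff h r n (by omega)).mp hlt
      rw [if_pos hlt, ih (by omega)]
      omega
    · have hfi : ¬ fIdx h r ≤ n := fun hc => hlt ((pm_getD_lt_iff h r n (by omega)).mpr hc)
      rw [if_neg hlt]
      omega

-- B's main loop computes count + FSpec, given the monotone-pointer invariant
theorem loopB_eq_FSpec (r : List Int) (hs : List Int) (count : Int) (run ptr : Nat)
    (hsort : hs.Pairwise (fun a b => a ≤ b)) (hp : ptr ≤ r.length)
    (hinv : ∀ h ∈ hs, fIdx h r ≤ ptr) :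
    maximumPeopleLoopB (pmAux none r) count run ptr hs = count + FSpec r run hs := by
  induction hs generalizing count run ptr with
  | nil => simp [maximumPeopleLoopB, FSpec]
  | cons h t ih =>
    simp only [maximumPeopleLoopB, FSpec]
    by_cases hrun : run = 0
    · simp [hrun]
    · rw [if_neg hrun, if_neg hrun]
      have hfp : fIdx h r ≤ ptr := hinv h (List.mem_cons_self ..)
      have hmv : movePtr (pmAux none r) h ptr = fIdx h r := by
        rw [movePtr_eq h r ptr hp]; omega
      simp only [hmv]
      have hj : (if fIdx h r < run then fIdx h r else run) = min (fIdx h r) run := by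
        simp only [min_def]; split <;> split <;> omega
      rw [hj]
      by_cases hj0 : min (fIdx h r) run = 0
      · simp [hj0]
      · rw [if_neg hj0, if_neg hj0]
        rw [ih (count + 1) (min (fIdx h r) run - 1) (fIdx h r) (hsort.sublist (List.sublist_cons_self ..))
          (fIdx_le_length h r)]
        · ring
        · intro h' hh'
          exact fIdx_antitone h h' r (List.rel_of_pairwise_cons hsort hh')

-- A's inner scan: starting at itrRoom ≤ fIdx of the current person, the loop reaches the
-- step for that person with j = min (fIdx) run
theorem loopA_scan (p r : List Int) (c : Int) (i itrRoom run : Nat)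
    (hi : i < p.length) (hir : itrRoom < run) (hrl : run ≤ r.length)
    (hfi : itrRoom ≤ fIdx (p.getD i 0) r) :
    maximumPeopleLoopA p r c i itrRoom run =
      (if min (fIdx (p.getD i 0) r) run = 0 then c
       else maximumPeopleLoopA p r (c + 1) (i + 1) 0 (min (fIdx (p.getD i 0) r) run - 1)) := by
  induction hn : run - itrRoom using Nat.strong_induction_on generalizing itrRoom with
  | _ n ihn =>
    rw [maximumPeopleLoopA]
    rw [dif_pos ⟨hi, hir⟩]
    set h := p.getD i 0 with hh
    by_cases hle : h ≤ r.getD itrRoom 0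
    · rw [if_pos hle]
      have hnotlt : ¬ r.getD itrRoom 0 < h := not_lt.mpr hle
      have hfsucc : itrRoom + 1 ≤ fIdx h r := by
        rcases Nat.lt_or_ge itrRoom (fIdx h r) with h1 | h1
        · omega
        · have heq : fIdx h r = itrRoom := by omega
          have : fIdx h r < r.length := by omega
          exact absurd (getD_fIdx_lt h r this) (heq ▸ hnotlt)
      by_cases hend : itrRoom + 1 = run
      · rw [if_pos ⟨hend, hi⟩]
        have hmin : min (fIdx h r) run = run := by omega
        rw [hmin, if_neg (by omega)]
      · rw [if_neg (by intro hc; exact hend hc.1)]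
        exact ihn (run - (itrRoom + 1)) (by omega) (itrRoom + 1) (by omega) hfsucc rfl
    · rw [if_neg hle]
      have hlt : r.getD itrRoom 0 < h := not_le.mp hle
      have hfle : fIdx h r ≤ itrRoom := fIdx_le_of_getD_lt h r itrRoom (by omega) hlt
      have heq : fIdx h r = itrRoom := by omega
      by_cases h1 : 1 ≤ itrRoom
      · rw [if_pos h1]
        have hmin : min (fIdx h r) run = itrRoom := by omega
        rw [hmin, if_neg (by omega)]
      · rw [if_neg h1]
        have hmin : min (fIdx h r) run = 0 := by omega
        rw [hmin, if_pos rfl]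

theorem FSpec_cons (r : List Int) (run : Nat) (h : Int) (t : List Int) :
    FSpec r run (h :: t) =
      if run = 0 then 0
      else if min (fIdx h r) run = 0 then 0 else 1 + FSpec r (min (fIdx h r) run - 1) t := rfl

-- A's loop from the start of a scan computes c + FSpec on the remaining persons
theorem loopA_eq_FSpec (p r : List Int) (c : Int) (i run : Nat) (hrl : run ≤ r.length) :
    maximumPeopleLoopA p r c i 0 run = c + FSpec r run (p.drop i) := by
  induction hn : p.length - i using Nat.strong_induction_on generalizing c i run with
  | _ n ihn =>
    by_cases hi : i < p.length
    · have hdrop : p.drop i = p.getD i 0 :: p.drop (i + 1) := by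
        rw [List.drop_eq_getElem_cons hi]
        congr 1
        simp [List.getD_eq_getElem?_getD, List.getElem?_eq_getElem hi]
      by_cases hrun : run = 0
      · rw [maximumPeopleLoopA, dif_neg (by omega), hdrop]
        rw [FSpec_cons, if_pos hrun, add_zero]
      · rw [loopA_scan p r c i 0 run hi (by omega) hrl (by omega), hdrop]
        rw [FSpec_cons, if_neg hrun]
        by_cases hj : min (fIdx (p.getD i 0) r) run = 0
        · rw [if_pos hj, if_pos hj]; ring
        · rw [if_neg hj, if_neg hj]
          rw [ihn (p.length - (i + 1)) (by omega) (c + 1) (i + 1) _ (by omega) rfl]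
          ring
    · rw [maximumPeopleLoopA, dif_neg (by omega)]
      rw [List.drop_eq_nil_of_le (by omega)]
      simp [FSpec]

-- ===== VERDICT (by name: the statement is the Claim_ definition above) =====
theorem maximumPeople_spec : Claim_equal_maximumPeople := by
  intro personHeight roomHeight _hdom
  unfold Spec_maximumPeople maximumPeople maximumPeople_alt
  set sp := PySem.List.sorted personHeight (fun x => x) false with hsp
  rw [loopA_eq_FSpec sp roomHeight 0 0 roomHeight.length (le_refl _)]
  rw [loopB_eq_FSpec roomHeight sp 0 roomHeight.length roomHeight.length
    (PySem.List.sorted_pairwise ..) (le_refl _)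
    (fun h _ => fIdx_le_length h roomHeight)]
  simp
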